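-- pv_equiv track=rewrite | github.com/aparna-narasimhan/python_examples | Misc/reverse_bits_of_integer.py | toggleBits
-- ===== SOURCE A (Python) =====
-- def toggleBits(num):
--     if num == 0:
--         return 1
--     solution = 0
--     nextSetBit = 1
--     while num !=0:
--         lastBit = num & 1
--         if lastBit == 0:
--             solution |= nextSetBit
--         nextSetBit = nextSetBit << 1
--         num = num >> 1
--     return solution
-- ===== SOURCE B (Python) =====
-- def toggleBits(num):
--     if num == 0:
--         return 1
--     return num ^ ((1 << num.bit_length()) - 1)
-- ===== Notes on version B (the rewrite author's own statement) =====
-- stated objective: simpler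
-- what changed: Replaced the per-bit while-loop with accumulator and shifting mask by the closed form num ^ ((1 << num.bit_length()) - 1), keeping the num == 0 guard; Pre_ excludes negative num, where A's while-loop never terminates (arithmetic right shift keeps num at -1).
import Mathlib
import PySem

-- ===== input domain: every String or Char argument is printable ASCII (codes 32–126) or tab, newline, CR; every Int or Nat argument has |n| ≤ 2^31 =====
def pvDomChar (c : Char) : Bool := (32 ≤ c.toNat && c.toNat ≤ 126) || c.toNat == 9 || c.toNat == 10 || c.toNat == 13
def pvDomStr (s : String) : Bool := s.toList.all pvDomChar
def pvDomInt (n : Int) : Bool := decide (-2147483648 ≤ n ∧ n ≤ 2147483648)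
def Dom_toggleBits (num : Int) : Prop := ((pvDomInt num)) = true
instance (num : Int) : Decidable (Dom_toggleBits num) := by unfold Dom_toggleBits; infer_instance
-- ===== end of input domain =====

-- B replaces A's per-bit accumulator loop by the closed form num ^ ((1 << num.bit_length()) - 1);
-- equivalence is proved for num ≥ 0 (on negative num A's while-loop never terminates).

-- ===== PORT A =====
-- Python's 'while num != 0' loop; fuel makes it total in Lean (for num ≥ 0 the fuel is ample,
-- since the loop runs bit_length(num) ≤ num iterations; negative num, where Python diverges,
-- is excluded by Pre_toggleBits).
def toggleBitsLoop : Nat → Int → Int → Int → Int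
  | 0, _, solution, _ => solution
  | fuel + 1, num, solution, nextSetBit =>
    if num = 0 then solution
    else
      let lastBit := PySem.Int.band num 1
      let solution' := if lastBit = 0 then PySem.Int.bor solution nextSetBit else solution
      toggleBitsLoop fuel (num >>> (1 : Nat)) solution' (nextSetBit <<< (1 : Nat))

def toggleBits (num : Int) : Int :=
  if num = 0 then 1
  else toggleBitsLoop (num.natAbs + 1) num 0 1

-- ===== PORT B =====
def toggleBits_alt (num : Int) : Int :=
  if num = 0 then 1
  else PySem.Int.bxor num ((1 <<< PySem.Int.bitLength num) - 1)

-- ===== PRECONDITION & SPEC =====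
-- Pre_ excludes negative num: there Python A loops forever ('num >> 1' stays -1), so A returns on exactly these inputs.
def Pre_toggleBits (num : Int) : Prop := 0 ≤ num
instance (num : Int) : Decidable (Pre_toggleBits num) := by unfold Pre_toggleBits; infer_instance
def pvWitness_toggleBits : Int := (5)

def Spec_toggleBits (num : Int) (out : Int) : Prop := out = toggleBits_alt num
instance (num : Int) (out : Int) : Decidable (Spec_toggleBits num out) := by unfold Spec_toggleBits; infer_instance

-- ===== CLAIM (what is proved, stated in full; the proofs are below) =====
def Claim_equal_toggleBits : Prop := ∀ (num : Int), Dom_toggleBits num → Pre_toggleBits num → Spec_toggleBits num (toggleBits num)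

-- ===== LEMMAS AND PROOFS =====

-- bit_length of a positive Nat, seen through the Int cast
def pvBL (n : Nat) : Nat := PySem.Int.bitLength (n : Int)

lemma pvBL_halving {n : Nat} (h : 0 < n) : pvBL n = pvBL (n / 2) + 1 := by
  simpa [pvBL] using PySem.Int.bitLength_natCast (m := n) (by exact_mod_cast h)

lemma pvBL_one : pvBL 1 = 1 := by decide

-- sol ||| 2^k = sol + 2^k when sol < 2^k
lemma pv_or_two_pow {sol k : Nat} (h : sol < 2 ^ k) : sol ||| 2 ^ k = sol + 2 ^ k := by
  calc sol ||| 2 ^ k = 2 ^ k ||| sol := Nat.lor_comm _ _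
    _ = 1 <<< k ||| sol := by rw [Nat.one_shiftLeft]
    _ = 1 <<< k + sol := (Nat.shiftLeft_add_eq_or_of_lt h 1).symm
    _ = sol + 2 ^ k := by rw [Nat.one_shiftLeft]; omega

-- binary decomposition of xor-with-all-ones
lemma pv_xor_step (n L : Nat) :
    n ^^^ (2 ^ (L + 1) - 1) =
      (if n % 2 = 0 then 1 else 0) + 2 * (n / 2 ^^^ (2 ^ L - 1)) := by
  have hd : (n ^^^ (2 ^ (L + 1) - 1)) / 2 = n / 2 ^^^ (2 ^ L - 1) := by
    rw [Nat.xor_div_two]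
    congr 1
    have : 0 < 2 ^ L := Nat.two_pow_pos L
    omega
  have hm : (n ^^^ (2 ^ (L + 1) - 1)) % 2 = (n + (2 ^ (L + 1) - 1)) % 2 :=
    Nat.xor_mod_two_eq
  have hpow : 0 < 2 ^ (L + 1) := Nat.two_pow_pos _
  have heven : 2 ^ (L + 1) % 2 = 0 := by
    simp [Nat.pow_succ]
  have := Nat.div_add_mod (n ^^^ (2 ^ (L + 1) - 1)) 2
  split_ifs with h <;> omega

lemma pvLoop_zero (fuel : Nat) (sol nsb : Int) :
    toggleBitsLoop fuel 0 sol nsb = sol := by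
  cases fuel <;> simp [toggleBitsLoop]

-- cast helpers
lemma pv_shiftRight_cast (n : Nat) : ((n : Int) >>> (1 : Nat)) = ((n / 2 : Nat) : Int) := rfl

lemma pv_shiftLeft_cast (k : Nat) : (((2 ^ k : Nat) : Int) <<< (1 : Nat)) = ((2 ^ (k + 1) : Nat) : Int) := by
  show ((2 ^ k <<< 1 : Nat) : Int) = ((2 ^ (k + 1) : Nat) : Int)
  norm_num [Nat.shiftLeft_succ, Nat.shiftLeft_zero, Nat.pow_succ, Nat.mul_comm]

-- the loop invariant: starting from accumulator sol < 2^k and mask 2^k,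
-- the loop on n > 0 adds 2^k times the complement of n's bits
lemma pvLoop_main : ∀ n : Nat, 0 < n → ∀ fuel sol k : Nat, n ≤ fuel → sol < 2 ^ k →
    toggleBitsLoop fuel (n : Int) (sol : Int) ((2 ^ k : Nat) : Int) =
      ((sol + 2 ^ k * (n ^^^ (2 ^ pvBL n - 1)) : Nat) : Int) := by
  intro n
  induction n using Nat.strong_induction_on with
  | _ n ih =>
    intro hn fuel sol k hfuel hsol
    obtain ⟨f, rfl⟩ : ∃ f, fuel = f + 1 := ⟨fuel - 1, by omega⟩
    have hne : (n : Int) ≠ 0 := by exact_mod_cast Nat.pos_iff_ne_zero.mp hn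
    rw [toggleBitsLoop, if_neg hne]
    have hband : PySem.Int.band (n : Int) 1 = ((n &&& 1 : Nat) : Int) := by
      simpa using PySem.Int.band_natCast n 1
    have hand1 : n &&& 1 = n % 2 := Nat.and_one_is_mod n
    have hbor : PySem.Int.bor (sol : Int) ((2 ^ k : Nat) : Int) = ((sol + 2 ^ k : Nat) : Int) := by
      rw [PySem.Int.bor_natCast, pv_or_two_pow hsol]
    have hBL : pvBL n = pvBL (n / 2) + 1 := pvBL_halving hn
    by_cases hpar : n % 2 = 0
    · -- even: accumulator gains 2^k
      rw [hband, hand1, hpar]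
      simp only [Nat.cast_zero, reduceIte, hbor, pv_shiftRight_cast, pv_shiftLeft_cast]
      by_cases h2 : n / 2 = 0
      · omega  -- n even and positive forces n/2 > 0; contradiction
      · have h2' : 0 < n / 2 := Nat.pos_of_ne_zero h2
        have := ih (n / 2) (Nat.div_lt_self hn (by norm_num)) h2' f (sol + 2 ^ k) (k + 1)
          (by omega) (by have : 0 < 2 ^ k := Nat.two_pow_pos k; rw [Nat.pow_succ]; omega)
        rw [this]
        congr 1
        have hx := pv_xor_step n (pvBL (n / 2))
        rw [if_pos hpar] at hx
        rw [hBL, hx]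
        ring
    · -- odd: accumulator unchanged
      rw [hband, hand1]
      have : ((n % 2 : Nat) : Int) ≠ 0 := by
        have : n % 2 = 1 := Nat.mod_two_eq_zero_or_one n |>.resolve_left hpar
        simp [this]
      simp only [if_neg this, pv_shiftRight_cast, pv_shiftLeft_cast]
      by_cases h2 : n / 2 = 0
      · -- n = 1 : loop on 0 returns sol
        rw [h2]
        simp only [Nat.cast_zero, pvLoop_zero]
        have hn1 : n = 1 := by omega
        subst hn1
        rw [pvBL_one]
        norm_num
      · have h2' : 0 < n / 2 := Nat.pos_of_ne_zero h2
        have := ih (n / 2) (Nat.div_lt_self hn (by norm_num)) h2' f sol (k + 1)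
          (by omega) (by have : 0 < 2 ^ k := Nat.two_pow_pos k; rw [Nat.pow_succ]; omega)
        rw [this]
        congr 1
        have hx := pv_xor_step n (pvBL (n / 2))
        rw [if_neg hpar] at hx
        rw [hBL, hx]
        ring

-- ===== VERDICT (by name: the statement is the Claim_ definition above) =====
theorem toggleBits_spec : Claim_equal_toggleBits := by
  intro num _ hpre
  unfold Spec_toggleBits toggleBits toggleBits_alt
  by_cases h0 : num = 0
  · simp [h0]
  · rw [if_neg h0, if_neg h0]
    obtain ⟨n, rfl⟩ : ∃ n : Nat, num = (n : Int) :=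
      ⟨num.toNat, by have := hpre; unfold Pre_toggleBits at this; omega⟩
    have hn : 0 < n := by
      rcases Nat.eq_zero_or_pos n with h | h
      · subst h; simp at h0
      · exact h
    have hmain := pvLoop_main n hn (n + 1) 0 0 (by omega) (by norm_num)
    simp only [pow_zero, Nat.cast_zero, Nat.cast_one] at hmain
    rw [show ((n : Int).natAbs + 1) = n + 1 by simp, hmain]
    have hpow : (0 : Nat) < 2 ^ pvBL n := Nat.two_pow_pos _
    have hx : ((1 <<< PySem.Int.bitLength (n : Int) : Nat) : Int) - 1 = ((2 ^ pvBL n - 1 : Nat) : Int) := by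
      rw [Nat.one_shiftLeft]
      show (((2 ^ pvBL n : Nat) : Int)) - 1 = _
      omega
    rw [hx, PySem.Int.bxor_natCast]
    norm_num
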